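-- pv_equiv track=rewrite | github.com/ubcbraincircuits/pyDynamo | pydynamo-brain/files/idremap.py | _mergeFullRemap
-- ===== SOURCE A (Python) =====
-- def _mergeFullRemap(oldRemap, newRemap):
--     result = []
--
--     # Merge the overlap...
--     lastStack = min(len(oldRemap), len(newRemap))
--     for stackID in range(lastStack):
--         result.append(_mergeSingleRemap(oldRemap[stackID], newRemap[stackID]))
--
--     # ... then copy any final stages from old and new remaps:
--     result.extend([pair for pair in oldRemap[lastStack:]])
--     result.extend([pair for pair in newRemap[lastStack:]])
--     return result
--
-- def _mergeSingleRemap(oldRemap, newRemap):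
--     remap, inverseMap = [], {}
--     for pair in oldRemap:
--         remap.append(pair)
--
--     for fromID, newID in newRemap:
--         matchedOld = False
--         for i, pair in enumerate(remap):
--             if pair[1] == fromID:
--                 remap[i] = (pair[0], newID)
--                 matchedOld = True
--                 break
--         if not matchedOld:
--             remap.append((fromID, newID))
--     return remap
-- ===== SOURCE B (Python) =====
-- def _insortIdx(lst, x):
--     # insert x into the sorted index list lst, keeping it sorted (scan from the right)
--     i = len(lst)
--     while i > 0 and lst[i - 1] > x:
--         i -= 1
--     lst.insert(i, x)
--
-- def _mergeSingleRemap(oldRemap, newRemap):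
--     remap = list(oldRemap)
--     # index: second value -> ascending list of positions holding it
--     buckets = {}
--     for i, pair in enumerate(remap):
--         buckets.setdefault(pair[1], []).append(i)
--     for fromID, newID in newRemap:
--         bucket = buckets.get(fromID, [])
--         if bucket:
--             i = bucket.pop(0)
--             remap[i] = (remap[i][0], newID)
--             _insortIdx(buckets.setdefault(newID, []), i)
--         else:
--             remap.append((fromID, newID))
--             buckets.setdefault(newID, []).append(len(remap) - 1)
--     return remap
--
-- def _mergeFullRemap(oldRemap, newRemap):
--     merged = [_mergeSingleRemap(o, n) for o, n in zip(oldRemap, newRemap)]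
--     k = len(merged)
--     return merged + oldRemap[k:] + newRemap[k:]
-- ===== Notes on version B (the rewrite author's own statement) =====
-- stated objective: faster
-- what changed: Replaces the per-pair linear scan over the accumulated remap with a hash index from second-component value to the ascending list of positions holding it, maintained incrementally (pop the minimal position, ordered re-insert), so first-match lookup no longer rescans the list.
import Mathlib
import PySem

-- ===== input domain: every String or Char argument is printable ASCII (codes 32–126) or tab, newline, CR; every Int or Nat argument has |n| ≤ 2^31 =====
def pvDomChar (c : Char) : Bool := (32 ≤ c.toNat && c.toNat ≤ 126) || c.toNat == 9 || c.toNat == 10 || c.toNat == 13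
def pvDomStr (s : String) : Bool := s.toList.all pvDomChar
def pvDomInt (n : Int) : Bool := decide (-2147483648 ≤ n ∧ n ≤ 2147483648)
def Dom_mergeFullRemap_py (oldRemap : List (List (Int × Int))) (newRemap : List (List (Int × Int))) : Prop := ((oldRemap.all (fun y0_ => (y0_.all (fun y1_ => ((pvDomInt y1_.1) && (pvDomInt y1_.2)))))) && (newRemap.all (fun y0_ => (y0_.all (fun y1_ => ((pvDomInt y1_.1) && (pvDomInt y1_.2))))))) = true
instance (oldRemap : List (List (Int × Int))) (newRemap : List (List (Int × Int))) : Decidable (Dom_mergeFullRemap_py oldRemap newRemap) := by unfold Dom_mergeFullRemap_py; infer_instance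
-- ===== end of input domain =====

-- B replaces A's per-pair linear scan of the accumulated remap with a hash index
-- (second-component value -> ascending list of positions), maintained incrementally; faster.
-- Return-value equivalence only (both Pythons build fresh lists, no caller-visible mutation).

-- ===== PORT A =====
-- inner loop of _mergeSingleRemap's second for: first index with pair[1] == fromID, then
-- remap[i] = (pair[0], newID); no match appends. remap.getD i is remap[i] (i in range by findIdx?).
def pvAStep (remap : List (Int × Int)) (pr : Int × Int) : List (Int × Int) :=
  match List.findIdx? (fun pair => pair.2 == pr.1) remap with
  | some i => remap.set i ((remap.getD i (0, 0)).1, pr.2)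
  | none => remap ++ [(pr.1, pr.2)]

def mergeSingleRemap_py (oldRemap : List (Int × Int)) (newRemap : List (Int × Int)) : List (Int × Int) :=
  let remap := oldRemap.foldl (fun acc pair => acc ++ [pair]) []
  newRemap.foldl pvAStep remap

def mergeFullRemap_py (oldRemap : List (List (Int × Int))) (newRemap : List (List (Int × Int))) : List (List (Int × Int)) :=
  let lastStack := min oldRemap.length newRemap.length
  let result := (List.range lastStack).foldl
    (fun res sid => res ++ [mergeSingleRemap_py (oldRemap.getD sid []) (newRemap.getD sid [])]) []
  -- oldRemap[lastStack:] / newRemap[lastStack:] with 0 ≤ lastStack ≤ len are drops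
  result ++ oldRemap.drop lastStack ++ newRemap.drop lastStack

-- ===== PORT B =====
-- _insortIdx: scan from the right for the insertion point, then lst.insert(i, x).
def pvInsortLoop (lst : List Nat) (x : Nat) : Nat → Nat
  | 0 => 0
  | i + 1 => if lst.getD i 0 > x then pvInsortLoop lst x i else i + 1

def pvInsort (lst : List Nat) (x : Nat) : List Nat :=
  let p := pvInsortLoop lst x lst.length
  lst.take p ++ x :: lst.drop p      -- lst.insert(p, x) with 0 ≤ p ≤ len(lst)

-- the enumerate loop building buckets; indices are list positions, always ≥ 0, kept as Nat
def pvInitBuckets (remap : List (Int × Int)) : PySem.Dict Int (List Nat) :=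
  (remap.foldl (fun st pair => (st.1 + 1, st.2.insert pair.2 (st.2.getD pair.2 [] ++ [st.1])))
    ((0 : Nat), (PySem.Dict.empty : PySem.Dict Int (List Nat)))).2

def pvAltStep (st : List (Int × Int) × PySem.Dict Int (List Nat)) (pr : Int × Int) :
    List (Int × Int) × PySem.Dict Int (List Nat) :=
  let remap := st.1
  let buckets := st.2
  match buckets.getD pr.1 [] with
  | i :: rest =>
      let p := remap.getD i (0, 0)            -- remap[i], i in range by construction
      let remap' := remap.set i (p.1, pr.2)
      let b1 := buckets.insert pr.1 rest      -- bucket.pop(0) mutates buckets[fromID]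
      (remap', b1.insert pr.2 (pvInsort (b1.getD pr.2 []) i))
  | [] =>
      (remap ++ [(pr.1, pr.2)],
       buckets.insert pr.2 (buckets.getD pr.2 [] ++ [remap.length]))

def mergeSingleRemap_alt (oldRemap : List (Int × Int)) (newRemap : List (Int × Int)) : List (Int × Int) :=
  (newRemap.foldl pvAltStep (oldRemap, pvInitBuckets oldRemap)).1

def mergeFullRemap_py_alt (oldRemap : List (List (Int × Int))) (newRemap : List (List (Int × Int))) : List (List (Int × Int)) :=
  let merged := (oldRemap.zip newRemap).map (fun pr => mergeSingleRemap_alt pr.1 pr.2)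
  merged ++ oldRemap.drop merged.length ++ newRemap.drop merged.length

-- ===== PRECONDITION & SPEC =====
def Spec_mergeFullRemap_py (oldRemap : List (List (Int × Int))) (newRemap : List (List (Int × Int))) (out : List (List (Int × Int))) : Prop := out = mergeFullRemap_py_alt oldRemap newRemap
instance (oldRemap : List (List (Int × Int))) (newRemap : List (List (Int × Int))) (out : List (List (Int × Int))) : Decidable (Spec_mergeFullRemap_py oldRemap newRemap out) := by unfold Spec_mergeFullRemap_py; infer_instance

-- ===== CLAIM (what is proved, stated in full; the proofs are below) =====
def Claim_equal_mergeFullRemap_py : Prop := ∀ (oldRemap : List (List (Int × Int))) (newRemap : List (List (Int × Int))), Dom_mergeFullRemap_py oldRemap newRemap → Spec_mergeFullRemap_py oldRemap newRemap (mergeFullRemap_py oldRemap newRemap)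

-- ===== LEMMAS AND PROOFS =====

-- B's bucket invariant: buckets maps v to the ascending list of positions whose second is v
def pvBInv (remap : List (Int × Int)) (buckets : PySem.Dict Int (List Nat)) : Prop :=
  ∀ v : Int, buckets.getD v [] =
    (List.range remap.length).filter (fun j => (remap.getD j (0, 0)).2 == v)

theorem pvMemFilt {n : Nat} {p : Nat → Bool} {a : Nat} :
    a ∈ (List.range n).filter p ↔ a < n ∧ p a = true := by
  simp [List.mem_filter, List.mem_range]

theorem pvSortedFilt (n : Nat) (p : Nat → Bool) :
    ((List.range n).filter p).Pairwise (· < ·) :=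
  (List.pairwise_lt_range).filter p

-- two strictly increasing Nat lists with the same members are equal
theorem pvSortedMemEq : ∀ (l₁ l₂ : List Nat), l₁.Pairwise (· < ·) → l₂.Pairwise (· < ·) →
    (∀ a, a ∈ l₁ ↔ a ∈ l₂) → l₁ = l₂ := by
  intro l₁
  induction l₁ with
  | nil =>
    intro l₂ _ _ hm
    cases l₂ with
    | nil => rfl
    | cons b t2 => exact absurd ((hm b).2 List.mem_cons_self) (List.not_mem_nil)
  | cons a t ih =>
    intro l₂ h1 h2 hm
    cases l₂ with
    | nil => exact absurd ((hm a).1 List.mem_cons_self) (List.not_mem_nil)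
    | cons b t2 =>
      have hab : a = b := by
        rcases List.mem_cons.1 ((hm a).1 List.mem_cons_self) with h | ha
        · exact h
        · rcases List.mem_cons.1 ((hm b).2 List.mem_cons_self) with h | hb
          · exact h.symm
          · have h3 := (List.pairwise_cons.1 h1).1 b hb
            have h4 := (List.pairwise_cons.1 h2).1 a ha
            omega
      subst hab
      have ht : t = t2 := by
        refine ih t2 (List.pairwise_cons.1 h1).2 (List.pairwise_cons.1 h2).2 (fun x => ⟨?_, ?_⟩)
        · intro hx
          rcases List.mem_cons.1 ((hm x).1 (List.mem_cons_of_mem _ hx)) with h | h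
          · subst h; exact absurd ((List.pairwise_cons.1 h1).1 x hx) (by omega)
          · exact h
        · intro hx
          rcases List.mem_cons.1 ((hm x).2 (List.mem_cons_of_mem _ hx)) with h | h
          · subst h; exact absurd ((List.pairwise_cons.1 h2).1 x hx) (by omega)
          · exact h
      rw [ht]

theorem pvFindIdx?_eq_head? (q : Int × Int → Bool) (l : List (Int × Int)) :
    List.findIdx? q l = ((List.range l.length).filter (fun j => q (l.getD j (0, 0)))).head? := by
  induction l with
  | nil => rfl
  | cons a t ih =>
    rw [List.length_cons, List.range_succ_eq_map, List.filter_cons]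
    by_cases hq : q a
    · simp [List.findIdx?_cons, hq]
    · rw [List.findIdx?_cons]
      simp only [List.getD_cons_zero, hq, if_neg, Bool.false_eq_true, not_false_eq_true,
        List.filter_map, ih]
      have hcomp : ((fun j => q ((a :: t).getD j (0, 0))) ∘ Nat.succ)
          = (fun j => q (t.getD j (0, 0))) := by
        funext j; simp [Function.comp, List.getD_cons_succ]
      rw [hcomp]
      cases (List.filter (fun j => q (t.getD j (0, 0))) (List.range t.length)) <;> simp

-- _insortIdx's while loop: the returned position p
theorem pvInsortLoop_spec (lst : List Nat) (x : Nat) :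
    ∀ n, pvInsortLoop lst x n ≤ n ∧
      (∀ j, pvInsortLoop lst x n ≤ j → j < n → x < lst.getD j 0) ∧
      (0 < pvInsortLoop lst x n → lst.getD (pvInsortLoop lst x n - 1) 0 ≤ x) := by
  intro n
  induction n with
  | zero => simp [pvInsortLoop]
  | succ m ih =>
    rw [pvInsortLoop]
    split_ifs with hgt
    · obtain ⟨ih1, ih2, ih3⟩ := ih
      refine ⟨by omega, ?_, ih3⟩
      intro j hj1 hj2
      rcases Nat.lt_or_ge j m with h | h
      · exact ih2 j hj1 h
      · have : j = m := by omega
        subst this; omega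
    · exact ⟨le_refl _, by omega, by simpa using Nat.le_of_not_lt hgt⟩

theorem pvInsort_spec (l : List Nat) (x : Nat) (hs : l.Pairwise (· < ·)) (hx : x ∉ l) :
    (pvInsort l x).Pairwise (· < ·) ∧ (∀ a, a ∈ pvInsort l x ↔ a = x ∨ a ∈ l) := by
  obtain ⟨hple, hgt, hlex⟩ := pvInsortLoop_spec l x l.length
  set p := pvInsortLoop l x l.length with hp
  have hgetelem : ∀ i, ∀ (h : i < l.length), l.getD i 0 = l[i] := fun i h => List.getD_eq_getElem l 0 h
  have hmono := List.pairwise_iff_getElem.1 hs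
  constructor
  · rw [pvInsort, ← hp, List.pairwise_append]
    refine ⟨hs.sublist (List.take_sublist p l), ?_, ?_⟩
    · rw [List.pairwise_cons]
      refine ⟨?_, hs.sublist (List.drop_sublist p l)⟩
      intro b hb
      obtain ⟨k, hk, hbk⟩ := List.mem_iff_getElem.1 hb
      rw [List.getElem_drop] at hbk
      have hklen : p + k < l.length := by
        have := List.length_drop (l := l) (i := p) ▸ hk; omega
      have := hgt (p + k) (by omega) hklen
      rw [hgetelem _ hklen] at this
      omega
    · intro a ha b hbmem
      obtain ⟨j, hj, haj⟩ := List.mem_iff_getElem.1 ha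
      have hjp : j < p := by have := List.length_take (i := p) (l := l) ▸ hj; omega
      have hjlen : j < l.length := by omega
      rw [List.getElem_take] at haj
      rcases List.mem_cons.1 hbmem with rfl | hb
      · -- a < x
        have hpos : 0 < p := by omega
        have hplen : p - 1 < l.length := by omega
        have halepm : l[j] ≤ l[p - 1] := by
          rcases Nat.lt_or_ge j (p - 1) with h | h
          · exact le_of_lt (hmono j (p - 1) hjlen hplen h)
          · have : j = p - 1 := by omega
            subst this; exact le_refl _
        have hle : a ≤ b := by
          have := hlex hpos
          rw [hgetelem _ hplen] at this
          omega
        have hne : a ≠ b := by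
          intro h; subst h; exact hx (haj ▸ List.getElem_mem hjlen)
        omega
      · obtain ⟨k, hk, hbk⟩ := List.mem_iff_getElem.1 hb
        rw [List.getElem_drop] at hbk
        have hklen : p + k < l.length := by
          have := List.length_drop (l := l) (i := p) ▸ hk; omega
        have := hmono j (p + k) hjlen hklen (by omega)
        omega
  · intro a
    rw [pvInsort, ← hp]
    constructor
    · intro hmem
      rcases List.mem_append.1 hmem with h | h
      · exact Or.inr (List.mem_of_mem_take h)
      · rcases List.mem_cons.1 h with rfl | h
        · exact Or.inl rfl
        · exact Or.inr (List.mem_of_mem_drop h)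
    · intro hmem
      rcases hmem with rfl | h
      · exact List.mem_append.2 (Or.inr (List.mem_cons_self))
      · conv at h => rw [← List.take_append_drop p l]
        rcases List.mem_append.1 h with h | h
        · exact List.mem_append.2 (Or.inl h)
        · exact List.mem_append.2 (Or.inr (List.mem_cons_of_mem _ h))

theorem pvInitAux (l : List (Int × Int)) :
    ∀ (c : Nat) (d : PySem.Dict Int (List Nat)) (v : Int),
    ((l.foldl (fun st pair => (st.1 + 1, st.2.insert pair.2 (st.2.getD pair.2 [] ++ [st.1])))
      ((c : Nat), d)).2).getD v []
    = d.getD v [] ++ ((List.range l.length).filter (fun j => (l.getD j (0, 0)).2 == v)).map (· + c) := by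
  induction l with
  | nil => intro c d v; simp
  | cons q t ih =>
    intro c d v
    rw [List.foldl_cons]
    rw [ih (c + 1) (d.insert q.2 (d.getD q.2 [] ++ [c])) v]
    rw [List.length_cons, List.range_succ_eq_map, List.filter_cons]
    rw [PySem.Dict.getD_insert]
    have hcomp : (List.filter ((fun j => ((q :: t).getD j (0, 0)).2 == v) ∘ Nat.succ)
        (List.range t.length)) = List.filter (fun j => (t.getD j (0, 0)).2 == v)
        (List.range t.length) := by
      apply List.filter_congr; intro a _; simp [Function.comp, List.getD_cons_succ]
    have hmm : ∀ (L : List Nat), (L.map Nat.succ).map (· + c) = L.map (· + (c + 1)) := by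
      intro L; rw [List.map_map]; apply List.map_congr_left; intro a _; simp; omega
    by_cases hv : v = q.2
    · rw [if_pos hv]
      have hc : (((q :: t).getD 0 (0, 0)).2 == v) = true := by
        simp [List.getD_cons_zero, hv]
      rw [hc, if_pos rfl, List.filter_map, hcomp]
      rw [List.map_cons, hmm]
      simp [List.append_assoc, hv]
    · rw [if_neg hv]
      have hc : (((q :: t).getD 0 (0, 0)).2 == v) = false := by
        simp only [List.getD_cons_zero, beq_eq_false_iff_ne, ne_eq]
        exact fun h => hv h.symm
      rw [hc, if_neg (by simp), List.filter_map, hcomp, hmm]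

theorem pvInit_inv (remap : List (Int × Int)) : pvBInv remap (pvInitBuckets remap) := by
  intro v
  rw [pvInitBuckets, pvInitAux remap 0 PySem.Dict.empty v]
  simp

theorem pvGetD_set_eq (l : List (Int × Int)) (i : Nat) (y d : Int × Int) (hi : i < l.length) :
    (l.set i y).getD i d = y := by
  rw [List.getD_eq_getElem _ _ (by simpa using hi)]
  simp [List.getElem_set, hi]

theorem pvGetD_set_ne (l : List (Int × Int)) (i j : Nat) (y d : Int × Int) (h : j ≠ i) :
    (l.set i y).getD j d = l.getD j d := by
  rcases Nat.lt_or_ge j l.length with hj | hj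
  · rw [List.getD_eq_getElem _ _ (by simpa using hj), List.getD_eq_getElem _ _ hj]
    simp [List.getElem_set, h.symm]
  · rw [List.getD_eq_default _ _ (by simpa using hj), List.getD_eq_default _ _ hj]

theorem pvGetD_append_lt (l l' : List (Int × Int)) (j : Nat) (d : Int × Int) (h : j < l.length) :
    (l ++ l').getD j d = l.getD j d := by
  rw [List.getD_eq_getElem _ _ (by simp; omega), List.getD_eq_getElem _ _ h]
  exact List.getElem_append_left h

theorem pvGetD_append_len (l : List (Int × Int)) (y d : Int × Int) :
    (l ++ [y]).getD l.length d = y := by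
  rw [List.getD_eq_getElem _ _ (by simp)]
  simp

theorem pvStep_eq (remap : List (Int × Int)) (buckets : PySem.Dict Int (List Nat))
    (pr : Int × Int) (h : pvBInv remap buckets) :
    (pvAltStep (remap, buckets) pr).1 = pvAStep remap pr ∧
    pvBInv (pvAltStep (remap, buckets) pr).1 (pvAltStep (remap, buckets) pr).2 := by
  have hfind := pvFindIdx?_eq_head? (fun pair => pair.2 == pr.1) remap
  cases hb : buckets.getD pr.1 [] with
  | nil =>
    have hfilt : (List.range remap.length).filter
        (fun j => (remap.getD j (0, 0)).2 == pr.1) = [] := by rw [← h pr.1, hb]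
    have hA : pvAStep remap pr = remap ++ [(pr.1, pr.2)] := by
      rw [pvAStep, hfind, hfilt]; rfl
    have hB : pvAltStep (remap, buckets) pr
        = (remap ++ [(pr.1, pr.2)],
           buckets.insert pr.2 (buckets.getD pr.2 [] ++ [remap.length])) := by
      rw [pvAltStep]; rw [hb]
    refine ⟨by rw [hA, hB], ?_⟩
    rw [hB]
    intro v
    simp only
    rw [PySem.Dict.getD_insert]
    have hlen : (remap ++ [(pr.1, pr.2)]).length = remap.length + 1 := by simp
    rw [hlen, List.range_succ, List.filter_append]
    have hleft : (List.range remap.length).filter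
        (fun j => ((remap ++ [(pr.1, pr.2)]).getD j (0, 0)).2 == v)
        = (List.range remap.length).filter (fun j => (remap.getD j (0, 0)).2 == v) := by
      apply List.filter_congr; intro a ha
      rw [pvGetD_append_lt _ _ _ _ (List.mem_range.1 ha)]
    rw [hleft]
    have hr : ([remap.length] : List Nat).filter
        (fun j => ((remap ++ [(pr.1, pr.2)]).getD j (0, 0)).2 == v)
        = if v = pr.2 then [remap.length] else [] := by
      rw [List.filter_cons]
      rw [pvGetD_append_len]
      by_cases hv : v = pr.2
      · simp [hv]
      · simp only [List.filter_nil]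
        have : ((pr.1, pr.2).2 == v) = false := by simp; exact fun hh => hv hh.symm
        simp [this, hv]
    rw [hr]
    by_cases hv : v = pr.2
    · rw [if_pos hv, if_pos hv, hv, h pr.2]
    · rw [if_neg hv, if_neg hv, h v, List.append_nil]
  | cons i rest =>
    have hfilt : (List.range remap.length).filter
        (fun j => (remap.getD j (0, 0)).2 == pr.1) = i :: rest := by rw [← h pr.1, hb]
    have himem : i < remap.length ∧ (remap.getD i (0, 0)).2 = pr.1 := by
      have : i ∈ i :: rest := List.mem_cons_self
      rw [← hfilt] at this
      have := pvMemFilt.1 this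
      exact ⟨this.1, by simpa using this.2⟩
    obtain ⟨hilt, hival⟩ := himem
    have hsorted : (i :: rest).Pairwise (· < ·) := hfilt ▸ pvSortedFilt _ _
    have himin : ∀ b ∈ rest, i < b := (List.pairwise_cons.1 hsorted).1
    have hrest_sorted : rest.Pairwise (· < ·) := (List.pairwise_cons.1 hsorted).2
    have hinotrest : i ∉ rest := fun hmem => absurd (himin i hmem) (lt_irrefl i)
    have hrest_mem : ∀ a, a ∈ rest ↔ (a < remap.length ∧ (remap.getD a (0, 0)).2 = pr.1 ∧ a ≠ i) := by
      intro a
      constructor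
      · intro ha
        have : a ∈ i :: rest := List.mem_cons_of_mem _ ha
        rw [← hfilt] at this
        have hm := pvMemFilt.1 this
        exact ⟨hm.1, by simpa using hm.2, fun hai => hinotrest (hai ▸ ha)⟩
      · intro ⟨h1, h2, h3⟩
        have : a ∈ i :: rest := by
          rw [← hfilt]; exact pvMemFilt.2 ⟨h1, by simpa using h2⟩
        exact (List.mem_cons.1 this).resolve_left h3
    have hA : pvAStep remap pr = remap.set i ((remap.getD i (0, 0)).1, pr.2) := by
      rw [pvAStep, hfind, hfilt]; rfl
    have hB : pvAltStep (remap, buckets) pr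
        = (remap.set i ((remap.getD i (0, 0)).1, pr.2),
           (buckets.insert pr.1 rest).insert pr.2
             (pvInsort ((buckets.insert pr.1 rest).getD pr.2 []) i)) := by
      rw [pvAltStep]; rw [hb]
    refine ⟨by rw [hA, hB], ?_⟩
    rw [hB]
    intro v
    simp only
    set remap' := remap.set i ((remap.getD i (0, 0)).1, pr.2) with hremap'
    have hlen' : remap'.length = remap.length := by simp [hremap']
    have hget' : ∀ j, j ≠ i → (remap'.getD j (0, 0)) = remap.getD j (0, 0) := by
      intro j hj; exact pvGetD_set_ne _ _ _ _ _ hj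
    have hgeti' : (remap'.getD i (0, 0)) = ((remap.getD i (0, 0)).1, pr.2) :=
      pvGetD_set_eq _ _ _ _ hilt
    have hL : (buckets.insert pr.1 rest).getD pr.2 []
        = if pr.2 = pr.1 then rest else buckets.getD pr.2 [] := PySem.Dict.getD_insert ..
    rw [PySem.Dict.getD_insert]
    by_cases hv2 : v = pr.2
    · subst hv2
      rw [if_pos rfl]
      have hLs : ((buckets.insert pr.1 rest).getD pr.2 []).Pairwise (· < ·) := by
        rw [hL]; split_ifs
        · exact hrest_sorted
        · rw [h pr.2]; exact pvSortedFilt _ _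
      have hLni : i ∉ (buckets.insert pr.1 rest).getD pr.2 [] := by
        rw [hL]; split_ifs with heq
        · exact hinotrest
        · rw [h pr.2]; intro hmem
          have h5 := (pvMemFilt.1 hmem).2
          rw [hival] at h5
          have h5' : pr.1 = pr.2 := by simpa using h5
          exact heq h5'.symm
      obtain ⟨hins_sorted, hins_mem⟩ := pvInsort_spec _ i hLs hLni
      refine pvSortedMemEq _ _ hins_sorted (pvSortedFilt _ _) ?_
      intro a
      rw [hins_mem, pvMemFilt, hlen']
      by_cases hai : a = i
      · subst hai
        simp only [true_or, true_iff]
        refine ⟨hilt, ?_⟩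
        rw [hgeti']
        simp
      · constructor
        · intro hmem
          rcases hmem with h' | hmem
          · exact absurd h' hai
          · rw [hL] at hmem
            split_ifs at hmem with heq
            · rw [hrest_mem] at hmem
              refine ⟨hmem.1, ?_⟩
              rw [hget' a hai, heq]
              simpa using hmem.2.1
            · rw [h pr.2] at hmem
              have h6 := pvMemFilt.1 hmem
              refine ⟨h6.1, ?_⟩
              rw [hget' a hai]
              exact h6.2
        · intro ⟨h1, h2⟩
          rw [hget' a hai] at h2
          right
          rw [hL]
          split_ifs with heq
          · rw [hrest_mem]
            refine ⟨h1, ?_, hai⟩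
            rw [← heq]
            simpa using h2
          · rw [h pr.2]
            exact pvMemFilt.2 ⟨h1, h2⟩
    · rw [if_neg hv2, PySem.Dict.getD_insert]
      by_cases hv1 : v = pr.1
      · subst hv1
        rw [if_pos rfl]
        refine pvSortedMemEq _ _ hrest_sorted (pvSortedFilt _ _) ?_
        intro a
        rw [pvMemFilt, hlen', hrest_mem]
        by_cases hai : a = i
        · subst hai
          constructor
          · intro ⟨_, _, hne⟩; exact absurd rfl hne
          · intro ⟨_, hh⟩
            rw [hgeti'] at hh
            have hh' : pr.2 = pr.1 := by simpa using hh
            exact absurd hh' (fun he => hv2 he.symm)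
        · constructor
          · intro ⟨h1, h2, _⟩
            refine ⟨h1, ?_⟩
            rw [hget' a hai]
            exact beq_iff_eq.mpr h2
          · intro ⟨h1, h2⟩
            rw [hget' a hai] at h2
            exact ⟨h1, beq_iff_eq.mp h2, hai⟩
      · rw [if_neg hv1, h v, hlen']
        apply List.filter_congr
        intro a ha
        by_cases hai : a = i
        · subst hai
          have e1 : ((pr.1 : Int) == v) = false := by
            simp only [beq_eq_false_iff_ne, ne_eq]
            exact fun hh => hv1 hh.symm
          have e2 : ((pr.2 : Int) == v) = false := by
            simp only [beq_eq_false_iff_ne, ne_eq]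
            exact fun hh => hv2 hh.symm
          rw [hival, hgeti']
          show ((pr.1 : Int) == v) = ((pr.2 : Int) == v)
          rw [e1, e2]
        · rw [hget' a hai]

theorem pvFold_eq : ∀ (newR : List (Int × Int)) (remap : List (Int × Int))
    (buckets : PySem.Dict Int (List Nat)), pvBInv remap buckets →
    newR.foldl pvAStep remap = (newR.foldl pvAltStep (remap, buckets)).1 := by
  intro newR
  induction newR with
  | nil => intro remap buckets _; rfl
  | cons pr t ih =>
    intro remap buckets h
    obtain ⟨h1, h2⟩ := pvStep_eq remap buckets pr h
    rw [List.foldl_cons, List.foldl_cons, ← h1]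
    have := ih (pvAltStep (remap, buckets) pr).1 (pvAltStep (remap, buckets) pr).2 h2
    rwa [Prod.mk.eta] at this

theorem pvCopy_eq (l : List (Int × Int)) :
    l.foldl (fun acc pair => acc ++ [pair]) [] = l := by
  have haux : ∀ (l acc : List (Int × Int)), l.foldl (fun acc pair => acc ++ [pair]) acc = acc ++ l := by
    intro l
    induction l with
    | nil => intro acc; simp
    | cons a t ih => intro acc; rw [List.foldl_cons, ih]; simp
  simpa using haux l []

theorem pvSingle_eq (oldR newR : List (Int × Int)) :
    mergeSingleRemap_py oldR newR = mergeSingleRemap_alt oldR newR := by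
  rw [mergeSingleRemap_py, mergeSingleRemap_alt]
  simp only [pvCopy_eq]
  exact pvFold_eq newR oldR (pvInitBuckets oldR) (pvInit_inv oldR)

theorem pvFoldRangeMap {α : Type} (g : Nat → α) :
    ∀ (l : List Nat) (acc : List α),
    l.foldl (fun res sid => res ++ [g sid]) acc = acc ++ l.map g := by
  intro l
  induction l with
  | nil => intro acc; simp
  | cons a t ih => intro acc; rw [List.foldl_cons, ih]; simp

-- ===== VERDICT (by name: the statement is the Claim_ definition above) =====
theorem mergeFullRemap_py_spec : Claim_equal_mergeFullRemap_py := by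
  intro oldRemap newRemap _
  unfold Spec_mergeFullRemap_py mergeFullRemap_py mergeFullRemap_py_alt
  simp only [pvFoldRangeMap, List.nil_append]
  have hlen : ((oldRemap.zip newRemap).map
      (fun pr => mergeSingleRemap_alt pr.1 pr.2)).length
      = min oldRemap.length newRemap.length := by simp
  have hmap : (List.range (min oldRemap.length newRemap.length)).map
      (fun sid => mergeSingleRemap_py (oldRemap.getD sid []) (newRemap.getD sid []))
      = (oldRemap.zip newRemap).map (fun pr => mergeSingleRemap_alt pr.1 pr.2) := by
    apply List.ext_getElem
    · simp
    · intro k h1 h2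
      simp only [List.getElem_map, List.getElem_range, List.getElem_zip]
      have hk : k < min oldRemap.length newRemap.length := by simpa using h1
      rw [List.getD_eq_getElem _ _ (by omega), List.getD_eq_getElem _ _ (by omega)]
      exact pvSingle_eq _ _
  rw [hmap, hlen]
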